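-- pv_equiv track=rewrite | github.com/maoluois/pythonProject | blueqiao/test.py | mod4
-- ===== SOURCE A (Python) =====
-- def mod4(x):
--     s = []
--     while x > 0:
--         s.append(x % 4)
--         x = x // 4
--
--     ans = 0
--     for i in range(len(s)):
--         ans += s[i]
--     return ans
-- ===== SOURCE B (Python) =====
-- def mod4(x):
--     # Legendre-style closed form: the base-4 digit sum of x equals
--     # x - 3 * sum_{k>=1} floor(x / 4**k).  No digit is ever extracted.
--     if x <= 0:
--         return 0
--     t = 0
--     p = 4
--     while p <= x:
--         t += x // p
--         p *= 4
--     return x - 3 * t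
-- ===== Notes on version B (the rewrite author's own statement) =====
-- stated objective: alternative
-- what changed: Replaces A's extract-every-digit-with-mod-then-sum approach by the Legendre identity digitsum(x) = x - 3*sum of the floored quotients of x by successive powers of the base: B never computes a remainder or a digit, it only sums shifted quotients and applies the closed form.
import Mathlib
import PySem

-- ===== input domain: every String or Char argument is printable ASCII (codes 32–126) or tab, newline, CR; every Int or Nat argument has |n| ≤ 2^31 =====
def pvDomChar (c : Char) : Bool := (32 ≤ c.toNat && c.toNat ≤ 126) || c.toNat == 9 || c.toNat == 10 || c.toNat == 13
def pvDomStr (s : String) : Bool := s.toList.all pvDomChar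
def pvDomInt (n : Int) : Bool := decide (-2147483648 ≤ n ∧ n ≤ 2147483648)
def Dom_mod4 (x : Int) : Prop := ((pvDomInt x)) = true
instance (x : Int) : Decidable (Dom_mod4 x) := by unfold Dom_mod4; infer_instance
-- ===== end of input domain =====

-- B computes the base-4 digit sum by the closed form x - 3 * Σ_{k≥1} ⌊x/4^k⌋,
-- summing shifted quotients only — no digit/remainder is ever extracted
-- (objective: alternative algorithm, same return value on every int).

-- ===== PORT A =====
-- the while loop of A: builds the list s of base-4 digits, low digit first
def mod4Digits (x : Int) : List Int :=
  if _h : 0 < x then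
    PySem.Int.mod x 4 :: mod4Digits (PySem.Int.floordiv x 4)
  else []
termination_by x.toNat
decreasing_by
  have h4 : PySem.Int.floordiv x 4 = x / 4 := PySem.Int.floordiv_eq_ediv_of_pos (by omega)
  rw [h4]; omega

def mod4 (x : Int) : Int :=
  let s := mod4Digits x
  -- for i in range(len(s)): ans += s[i]
  (PySem.List.pyRange 0 (PySem.List.len s) 1).foldl
    (fun ans i => ans + PySem.List.pyGetD s i 0) 0

-- ===== PORT B =====
-- the while loop of B: t accumulates x//p over successive powers p while p ≤ x.
-- (the '0 < p' conjunct only totalises the recursion; in B, p is always 4^k > 0)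
def mod4AltLoop (x p t : Int) : Int :=
  if _h : 0 < p ∧ p ≤ x then
    mod4AltLoop x (p * 4) (t + PySem.Int.floordiv x p)
  else t
termination_by (x + 1 - p).toNat
decreasing_by omega

def mod4_alt (x : Int) : Int :=
  if x ≤ 0 then 0
  else x - 3 * mod4AltLoop x 4 0

-- ===== PRECONDITION & SPEC =====
def Spec_mod4 (x : Int) (out : Int) : Prop := out = mod4_alt x
instance (x : Int) (out : Int) : Decidable (Spec_mod4 x out) := by unfold Spec_mod4; infer_instance

-- ===== CLAIM (what is proved, stated in full; the proofs are below) =====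
def Claim_equal_mod4 : Prop := ∀ (x : Int), Dom_mod4 x → Spec_mod4 x (mod4 x)

-- ===== LEMMAS AND PROOFS =====

-- A's index loop over range(len s) is just a left fold of (+) over s
theorem mod4_eq_foldl (x : Int) :
    mod4 x = (mod4Digits x).foldl (· + ·) 0 := by
  unfold mod4
  simpa [PySem.List.len] using
    (PySem.List.foldl_pyRange_zero_pyGetD (xs := mod4Digits x)
      (f := (· + ·)) (d := 0) (init := 0))

theorem foldl_add_acc (l : List Int) : ∀ a : Int,
    l.foldl (· + ·) a = a + l.foldl (· + ·) 0 := by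
  induction l with
  | nil => intro a; simp
  | cons b l ih =>
      intro a
      simp only [List.foldl_cons]
      rw [ih (a + b), ih (0 + b)]; ring

-- A, unfolded once: digit-sum recursion
theorem mod4_rec (x : Int) (hx : 0 < x) :
    mod4 x = x % 4 + mod4 (x / 4) := by
  rw [mod4_eq_foldl, mod4_eq_foldl, mod4Digits]
  simp only [dif_pos hx, List.foldl_cons]
  rw [foldl_add_acc,
      PySem.Int.floordiv_eq_ediv_of_pos (a := x) (by norm_num),
      PySem.Int.mod_eq_emod_of_pos (a := x) (by norm_num)]
  ring

-- B's loop with accumulator t equals t + the loop started at 0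
theorem loop_acc (x : Int) : ∀ n p t, (x + 1 - p).toNat = n →
    mod4AltLoop x p t = t + mod4AltLoop x p 0 := by
  intro n
  induction n using Nat.strong_induction_on with
  | _ n ih =>
      intro p t hn
      conv_lhs => rw [mod4AltLoop]
      conv_rhs => rw [mod4AltLoop]
      by_cases h : 0 < p ∧ p ≤ x
      · simp only [dif_pos h]
        have hm : (x + 1 - p * 4).toNat < n := by omega
        rw [ih _ hm (p * 4) (t + PySem.Int.floordiv x p) rfl,
            ih _ hm (p * 4) (0 + PySem.Int.floordiv x p) rfl]
        ring
      · simp [h]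

-- shift lemma: dividing x by 4 drops one factor 4 from every loop divisor
theorem loop_shift (x : Int) : ∀ n p, 0 < p → (x + 1 - p * 4).toNat = n →
    mod4AltLoop x (p * 4) 0 = mod4AltLoop (x / 4) p 0 := by
  intro n
  induction n using Nat.strong_induction_on with
  | _ n ih =>
      intro p hp hn
      conv_lhs => rw [mod4AltLoop]
      conv_rhs => rw [mod4AltLoop]
      have hcond : (0 < p * 4 ∧ p * 4 ≤ x) ↔ (0 < p ∧ p ≤ x / 4) := by
        constructor
        · rintro ⟨_, h2⟩
          exact ⟨hp, (Int.le_ediv_iff_mul_le (by norm_num)).2 h2⟩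
        · rintro ⟨_, h2⟩
          exact ⟨by omega, (Int.le_ediv_iff_mul_le (by norm_num)).1 h2⟩
      by_cases h : 0 < p * 4 ∧ p * 4 ≤ x
      · rw [dif_pos h, dif_pos (hcond.1 h)]
        have hdiv : PySem.Int.floordiv x (p * 4) = PySem.Int.floordiv (x / 4) p := by
          rw [PySem.Int.floordiv_eq_ediv_of_pos (by omega),
              PySem.Int.floordiv_eq_ediv_of_pos hp,
              Int.ediv_ediv_of_nonneg (by norm_num : (0:Int) ≤ 4),
              Int.mul_comm]
        have hm : (x + 1 - p * 4 * 4).toNat < n := by omega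
        rw [hdiv, loop_acc x _ (p * 4 * 4) _ rfl, loop_acc (x / 4) _ (p * 4) _ rfl,
            ih _ hm (p * 4) (by omega) rfl]
      · rw [dif_neg h, dif_neg ((not_iff_not.2 hcond).1 h)]

theorem mod4_eq_alt (x : Int) : mod4 x = mod4_alt x := by
  induction x using mod4Digits.induct with
  | case2 x hx =>
      rw [mod4_eq_foldl, mod4Digits]
      simp only [dif_neg hx, List.foldl_nil]
      unfold mod4_alt
      rw [if_pos (by omega)]
  | case1 x hx ih =>
      have h4 : PySem.Int.floordiv x 4 = x / 4 :=
        PySem.Int.floordiv_eq_ediv_of_pos (by norm_num)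
      rw [h4] at ih
      rw [mod4_rec x hx, ih]
      unfold mod4_alt
      rw [if_neg (show ¬ x ≤ 0 by omega)]
      by_cases hlt : x < 4
      · have hq : x / 4 = 0 := by omega
        rw [if_pos (by omega)]
        conv_rhs => rw [mod4AltLoop]
        rw [dif_neg (show ¬ (0 < (4:Int) ∧ 4 ≤ x) by omega)]
        omega
      · rw [if_neg (show ¬ x / 4 ≤ 0 by omega)]
        conv_rhs => rw [mod4AltLoop]
        rw [dif_pos (show (0 < (4:Int) ∧ 4 ≤ x) by omega)]
        rw [loop_acc x _ (4 * 4) _ rfl,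
            loop_shift x _ 4 (by norm_num) rfl, h4]
        omega

-- ===== VERDICT (by name: the statement is the Claim_ definition above) =====
theorem mod4_spec : Claim_equal_mod4 := by
  intro x _
  unfold Spec_mod4
  exact mod4_eq_alt x
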